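-- pv_equiv track=rewrite | github.com/riceb/max_partition | solution.py | max_partition
-- ===== SOURCE A (Python) =====
-- def max_partition(a):
--
-- 	n = len(a)
--
-- 	# forward scan
-- 	max_front = []
-- 	max_so_far = float("-inf")
-- 	for i in range(n):
-- 		if a[i] > max_so_far:
-- 			max_so_far = a[i]
-- 		max_front.append(max_so_far)
--
--
-- 	# backward scan
-- 	min_back = []
-- 	min_so_far = float("inf")
-- 	for i in range(n-1):
-- 		if a[n-i-1] < min_so_far:
-- 			min_so_far = a[n-i-1]
-- 		# this inserts to the front, as we're scanning backwards
-- 		min_back.insert(0, min_so_far)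
--
-- 	# Now we do a forward scan, and for each index whose before max
-- 	# is smaller than its after min, we increment number of subarrays by 1.
-- 	partitions = 1
-- 	# Note that when we say partition at index i, we divide the array at i,
-- 	# incrementing the number of subarrays by 1. Thus, it doesn't make sense
-- 	# to partition on the last element since there're no elements after that.
-- 	for i in range(n-1):
-- 		if max_front[i] <= min_back[i]:
-- 			partitions += 1
-- 	return partitions
-- ===== SOURCE B (Python) =====
-- def max_partition(a):
-- 	# One left-to-right pass with a monotonic stack of chunk maxima: each stack
-- 	# entry is the running max of one chunk of the finest valid partition seen
-- 	# so far; a new element smaller than some chunk maxima merges those chunks.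
-- 	stack = []
-- 	for x in a:
-- 		if not stack or x >= stack[-1]:
-- 			stack.append(x)
-- 		else:
-- 			t = stack.pop()
-- 			while stack and stack[-1] > x:
-- 				stack.pop()
-- 			stack.append(t)
-- 	# the empty array still counts as a single partition
-- 	return max(1, len(stack))
-- ===== Notes on version B (the rewrite author's own statement) =====
-- stated objective: faster
-- what changed: B replaces A's three passes (prefix-max array, suffix-min array built via quadratic insert(0), comparison scan) by a single left-to-right pass with a monotonic stack of chunk maxima whose final size is the partition count.
import Mathlib
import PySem

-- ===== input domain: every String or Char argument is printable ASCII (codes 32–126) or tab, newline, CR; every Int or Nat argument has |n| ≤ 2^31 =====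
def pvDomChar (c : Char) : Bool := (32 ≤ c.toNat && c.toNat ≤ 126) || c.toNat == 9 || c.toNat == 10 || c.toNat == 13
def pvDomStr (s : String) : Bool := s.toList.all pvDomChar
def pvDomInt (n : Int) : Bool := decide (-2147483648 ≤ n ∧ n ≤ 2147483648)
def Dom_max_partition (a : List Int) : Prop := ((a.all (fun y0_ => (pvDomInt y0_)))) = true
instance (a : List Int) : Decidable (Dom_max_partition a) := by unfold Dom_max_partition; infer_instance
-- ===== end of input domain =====

-- B replaces A's prefix-max/suffix-min arrays by a single pass with a monotonic
-- stack of chunk maxima; objective: faster (one O(n)-ish pass, no quadratic insert(0)).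

-- ===== PORT A =====
-- loop body of A's forward scan: max_so_far is float("-inf") initially, modelled as
-- Option Int with none = -inf (so 'a[i] > max_so_far' is True when none)
def pvStepMax (s : List Int × Option Int) (x : Int) : List Int × Option Int :=
  let m : Option Int :=
    match s.2 with
    | none => some x
    | some m => if x > m then some x else some m
  (s.1 ++ [m.getD 0], m)

-- loop body of A's backward scan: min_so_far as Option Int (none = float("inf")),
-- min_back.insert(0, v) is cons
def pvStepMin (s : List Int × Option Int) (x : Int) : List Int × Option Int :=
  let m : Option Int :=
    match s.2 with
    | none => some x
    | some m => if x < m then some x else some m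
  (m.getD 0 :: s.1, m)

def max_partition (a : List Int) : Int :=
  let n : Int := PySem.List.len a
  -- every index a[i] / a[n-i-1] below is in range, so pyGetD is exact here
  let fwd := (PySem.List.pyRange 0 n 1).foldl
    (fun s i => pvStepMax s (PySem.List.pyGetD a i 0)) (([], none) : List Int × Option Int)
  let max_front := fwd.1
  let bwd := (PySem.List.pyRange 0 (n - 1) 1).foldl
    (fun s i => pvStepMin s (PySem.List.pyGetD a (n - i - 1) 0)) (([], none) : List Int × Option Int)
  let min_back := bwd.1
  (PySem.List.pyRange 0 (n - 1) 1).foldl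
    (fun p i =>
      if PySem.List.pyGetD max_front i 0 ≤ PySem.List.pyGetD min_back i 0 then p + 1 else p) 1

-- ===== PORT B =====
-- B's inner while loop 'while stack and stack[-1] > x: stack.pop()'
-- (the stack is kept top-first: Python's stack[-1] is the head, append = cons, pop = tail)
def pvPopGT (x : Int) : List Int → List Int
  | [] => []
  | y :: r => if y > x then pvPopGT x r else y :: r

-- B's loop body: append / append / (pop t; pop while > x; append t)
def pvStackStep (st : List Int) (x : Int) : List Int :=
  match st with
  | [] => [x]                                -- 'if not stack ...: append'
  | t :: r => if x ≥ t then x :: t :: r      -- '... or x >= stack[-1]: append'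
              else t :: pvPopGT x r          -- 't = pop(); while ...: pop(); append(t)'

def max_partition_alt (a : List Int) : Int :=
  max 1 (PySem.List.len (a.foldl pvStackStep []))

-- ===== PRECONDITION & SPEC =====
def Spec_max_partition (a : List Int) (out : Int) : Prop := out = max_partition_alt a
instance (a : List Int) (out : Int) : Decidable (Spec_max_partition a out) := by unfold Spec_max_partition; infer_instance

-- ===== CLAIM (what is proved, stated in full; the proofs are below) =====
def Claim_equal_max_partition : Prop := ∀ (a : List Int), Dom_max_partition a → Spec_max_partition a (max_partition a)

-- ===== LEMMAS AND PROOFS =====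

-- max / min of a nonempty list, as the running fold both ports compute
def maxOf : List Int → Int
  | [] => 0
  | x :: t => t.foldl max x

def minOf : List Int → Int
  | [] => 0
  | x :: t => t.foldl min x

theorem maxOf_append_singleton (l : List Int) (x : Int) (h : l ≠ []) :
    maxOf (l ++ [x]) = max (maxOf l) x := by
  cases l with
  | nil => simp at h
  | cons y t => simp [maxOf, List.foldl_append]

theorem minOf_append_singleton (l : List Int) (x : Int) (h : l ≠ []) :
    minOf (l ++ [x]) = min (minOf l) x := by
  cases l with
  | nil => simp at h
  | cons y t => simp [minOf, List.foldl_append]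

theorem minOf_mem (l : List Int) (h : l ≠ []) : minOf l ∈ l := by
  cases l with
  | nil => simp at h
  | cons y t =>
      rcases PySem.List.foldl_min_mem t y with h1 | h1
      · simp [minOf, h1]
      · simp [minOf]; right; exact h1

theorem minOf_le_mem (l : List Int) (y : Int) (hy : y ∈ l) : minOf l ≤ y := by
  cases l with
  | nil => simp at hy
  | cons z t =>
      rcases List.mem_cons.mp hy with rfl | hy
      · exact (PySem.List.foldl_min_le t y).1
      · exact (PySem.List.foldl_min_le t z).2 y hy

theorem minOf_reverse (l : List Int) : minOf l.reverse = minOf l := by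
  cases hl : l with
  | nil => rfl
  | cons z t =>
      have h1 : l ≠ [] := by simp [hl]
      have h2 : l.reverse ≠ [] := by simp [hl]
      apply le_antisymm
      · exact minOf_le_mem _ _ (List.mem_reverse.mpr (by rw [← hl] at *; exact minOf_mem l h1))
      · exact minOf_le_mem _ _ (List.mem_reverse.mp (by rw [← hl] at *; exact minOf_mem l.reverse h2))

theorem fwd_spec (a : List Int) :
    a.foldl pvStepMax (([], none) : List Int × Option Int) =
      ((List.range a.length).map (fun i => maxOf (a.take (i + 1))),
       if a = [] then none else some (maxOf a)) := by
  induction a using List.reverseRecOn with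
  | nil => rfl
  | append_singleton l x ih =>
      rw [List.foldl_append, ih]
      have hm : (match (if l = [] then none else some (maxOf l) : Option Int) with
          | none => some x
          | some m => if x > m then some x else some m) = some (maxOf (l ++ [x])) := by
        by_cases hl : l = []
        · subst hl; simp [maxOf]
        · simp only [if_neg hl, maxOf_append_singleton l x hl]
          by_cases hx : x > maxOf l
          · simp [hx, max_eq_right (le_of_lt hx)]
          · simp [hx, max_eq_left (le_of_not_gt hx)]
      simp only [List.foldl_cons, List.foldl_nil]
      simp only [pvStepMax, hm]
      refine Prod.ext ?_ (by simp)
      simp only [Option.getD_some, List.length_append, List.length_singleton,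
        List.range_succ, List.map_append, List.map_cons, List.map_nil]
      congr 1
      · apply List.map_congr_left
        intro i hi
        rw [List.take_append_of_le_length (by have := List.mem_range.mp hi; omega)]
      · rw [List.take_of_length_le (by simp)]

-- the backward scan over l (= reversed tail) builds the running-min table, newest first
theorem bwd_spec (l : List Int) :
    l.foldl pvStepMin (([], none) : List Int × Option Int) =
      ((List.range l.length).map (fun j => minOf (l.take (l.length - j))),
       if l = [] then none else some (minOf l)) := by
  induction l using List.reverseRecOn with
  | nil => rfl
  | append_singleton l x ih =>
      rw [List.foldl_append, ih]
      have hm : (match (if l = [] then none else some (minOf l) : Option Int) with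
          | none => some x
          | some m => if x < m then some x else some m) = some (minOf (l ++ [x])) := by
        by_cases hl : l = []
        · subst hl; simp [minOf]
        · simp only [if_neg hl, minOf_append_singleton l x hl]
          by_cases hx : x < minOf l
          · simp [hx, min_eq_right (le_of_lt hx)]
          · simp [hx, min_eq_left (le_of_not_gt hx)]
      simp only [List.foldl_cons, List.foldl_nil]
      simp only [pvStepMin, hm]
      refine Prod.ext ?_ (by simp)
      simp only [Option.getD_some, List.length_append, List.length_singleton]
      rw [List.range_succ_eq_map, List.map_cons, List.map_map]
      congr 1
      · rw [Nat.sub_zero, List.take_of_length_le (by simp)]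
      · apply List.map_congr_left
        intro j hj
        have hj' := List.mem_range.mp hj
        simp only [Function.comp]
        rw [List.take_append_of_le_length (by omega)]
        have : l.length + 1 - j.succ = l.length - j := by omega
        rw [this]

-- shifting the initial counter out of a counting fold
theorem foldl_if_shift (c : Nat → Prop) [DecidablePred c] (l : List Nat) (x : Int) :
    l.foldl (fun s k => if c k then s + 1 else s) (x + 1) =
      1 + l.foldl (fun s k => if c k then s + 1 else s) x := by
  induction l generalizing x with
  | nil => simp; ring
  | cons k t ih =>
      by_cases h : c k
      · simp only [List.foldl_cons, if_pos h]
        exact ih (x + 1)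
      · simp [h, ih]

theorem map_getD_eq_tail_reverse (a : List Int) :
    (List.range (a.length - 1)).map (fun k => a.getD (a.length - 1 - k) 0) = a.tail.reverse := by
  apply List.ext_getElem
  · simp
  · intro i h1 h2
    simp only [List.getElem_map, List.getElem_range, List.getElem_reverse, List.getElem_tail]
    rw [List.getD_eq_getElem _ _ (by simp at h1 ⊢; omega)]
    congr 1
    simp at h2 ⊢
    omega

theorem A_eq (a : List Int) :
    max_partition a =
      (List.range (a.length - 1)).foldl
        (fun p k => if maxOf (a.take (k + 1)) ≤ minOf (a.drop (k + 1)) then p + 1 else p) 1 := by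
  have h2 : (PySem.List.len a - 1 - 0).toNat = a.length - 1 := by
    simp [PySem.List.len]
  have hbwd : (PySem.List.pyRange 0 (PySem.List.len a - 1) 1).foldl
      (fun s i => pvStepMin s (PySem.List.pyGetD a (PySem.List.len a - i - 1) 0))
      (([], none) : List Int × Option Int) = a.tail.reverse.foldl pvStepMin ([], none) := by
    rw [PySem.List.pyRange_one, h2, List.foldl_map]
    rw [PySem.List.foldl_congr_mem (List.range (a.length - 1)) _
      (fun (s : List Int × Option Int) (k : Nat) => pvStepMin s (a.getD (a.length - 1 - k) 0)) _
      (fun acc k hk => by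
        have hk' : k < a.length - 1 := List.mem_range.mp hk
        have e : PySem.List.len a - (0 + (k : Int)) - 1 = ((a.length - 1 - k : Nat) : Int) := by
          simp only [PySem.List.len]; omega
        rw [e, PySem.List.pyGetD_natCast])]
    rw [← List.foldl_map, map_getD_eq_tail_reverse]
  simp only [max_partition]
  rw [PySem.List.foldl_pyRange_zero_pyGetD a 0 pvStepMax ([], none), fwd_spec, hbwd, bwd_spec]
  rw [PySem.List.pyRange_one, h2, List.foldl_map]
  apply PySem.List.foldl_congr_mem
  intro acc k hk
  have hk' : k < a.length - 1 := List.mem_range.mp hk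
  have e : (0 : Int) + (k : Int) = ((k : Nat) : Int) := by ring
  rw [e, PySem.List.pyGetD_natCast, PySem.List.pyGetD_natCast]
  simp only [List.length_reverse, List.length_tail]
  rw [PySem.List.getD_map_range _ _ _ _ (by omega),
      PySem.List.getD_map_range _ _ _ _ (by omega)]
  rw [List.take_reverse, minOf_reverse]
  have e2 : a.tail.length - (a.length - 1 - k) = k := by simp [List.length_tail]; omega
  rw [e2, List.drop_tail]

-- valid-cut bookkeeping used by both directions of the proof
def validCut (p : List Int) (k : Nat) : Bool :=  decide (maxOf (p.take k) ≤ minOf (p.drop k))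

def cuts (p : List Int) : List Nat := (List.range' 1 (p.length - 1)).filter (validCut p)

theorem maxOf_mem (l : List Int) (h : l ≠ []) : maxOf l ∈ l := by
  cases l with
  | nil => simp at h
  | cons y t =>
      rcases PySem.List.foldl_max_mem t y with h1 | h1
      · simp [maxOf, h1]
      · simp [maxOf]; right; exact h1

theorem maxOf_ge_mem (l : List Int) (y : Int) (hy : y ∈ l) : y ≤ maxOf l := by
  cases l with
  | nil => simp at hy
  | cons z t =>
      rcases List.mem_cons.mp hy with rfl | hy
      · exact (PySem.List.le_foldl_max t y).1
      · exact (PySem.List.le_foldl_max t z).2 y hy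

theorem take_ne_nil (l : List Int) (k : Nat) (hl : l ≠ []) (hk : 1 ≤ k) : l.take k ≠ [] := by
  apply List.ne_nil_of_length_pos
  simp only [List.length_take]
  have := List.length_pos_of_ne_nil hl
  omega

theorem maxOf_take_le (l : List Int) (k : Nat) (hl : l ≠ []) (hk : 1 ≤ k) :
    maxOf (l.take k) ≤ maxOf l :=
  maxOf_ge_mem l _ (List.mem_of_mem_take (maxOf_mem _ (take_ne_nil l k hl hk)))

theorem maxOf_take_mono (l : List Int) (k k' : Nat) (hl : l ≠ []) (hk : 1 ≤ k) (hkk : k ≤ k') :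
    maxOf (l.take k) ≤ maxOf (l.take k') := by
  have h1 : l.take k = (l.take k').take k := by rw [List.take_take, Nat.min_eq_left hkk]
  rw [h1]
  exact maxOf_take_le _ _ (take_ne_nil l k' hl (le_trans hk hkk)) hk

theorem popGT_filter (x : Int) (R : List Int) (h : R.Pairwise (fun a b => b ≤ a)) :
    pvPopGT x R = R.filter (fun y => decide (y ≤ x)) := by
  induction R with
  | nil => rfl
  | cons y r ih =>
      rcases List.pairwise_cons.mp h with ⟨hy, hr⟩
      by_cases hxy : y > x
      · rw [pvPopGT, if_pos hxy, List.filter_cons_of_neg (by simp; omega)]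
        exact ih hr
      · rw [pvPopGT, if_neg hxy, List.filter_cons_of_pos (by simp; omega)]
        congr 1
        symm
        rw [List.filter_eq_self]
        intro b hb
        simp only [decide_eq_true_eq]
        exact le_trans (hy b hb) (by omega)

theorem validCut_append (l : List Int) (x : Int) (k : Nat) (hl : l ≠ []) (_hk1 : 1 ≤ k)
    (hk2 : k ≤ l.length - 1) :
    validCut (l ++ [x]) k = (validCut l k && decide (maxOf (l.take k) ≤ x)) := by
  have hlen := List.length_pos_of_ne_nil hl
  have hkl : k ≤ l.length := by omega
  have hdrop : l.drop k ≠ [] := by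
    apply List.ne_nil_of_length_pos
    simp only [List.length_drop]
    omega
  unfold validCut
  rw [List.take_append_of_le_length hkl, List.drop_append_of_le_length hkl,
      minOf_append_singleton _ _ hdrop]
  rw [show (decide (maxOf (l.take k) ≤ min (minOf (l.drop k)) x) : Bool)
        = decide (maxOf (l.take k) ≤ minOf (l.drop k) ∧ maxOf (l.take k) ≤ x) from
      decide_eq_decide.mpr le_min_iff]
  exact Bool.decide_and _ _

theorem cuts_last_cond (l : List Int) (x : Int) :
    validCut (l ++ [x]) l.length = decide (maxOf l ≤ x) := by
  unfold validCut
  rw [List.take_append_of_le_length le_rfl, List.take_length,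
      List.drop_append_of_le_length le_rfl, List.drop_length]
  rfl

theorem cuts_append_split (l : List Int) (x : Int) (hl : l ≠ []) :
    cuts (l ++ [x]) =
      (List.range' 1 (l.length - 1)).filter
          (fun k => validCut l k && decide (maxOf (l.take k) ≤ x))
        ++ (if maxOf l ≤ x then [l.length] else []) := by
  have hlen := List.length_pos_of_ne_nil hl
  unfold cuts
  have h1 : (l ++ [x]).length - 1 = (l.length - 1) + 1 := by simp; omega
  rw [h1, List.range'_concat]
  have h2 : 1 + 1 * (l.length - 1) = l.length := by omega
  rw [h2, List.filter_append]
  congr 1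
  · apply List.filter_congr
    intro k hk
    rcases List.mem_range'_1.mp hk with ⟨hk1, hk2⟩
    exact validCut_append l x k hl hk1 (by omega)
  · rw [show List.filter (validCut (l ++ [x])) [l.length]
          = if validCut (l ++ [x]) l.length then [l.length] else [] by
        simp [List.filter_singleton]]
    rw [cuts_last_cond l x]
    by_cases hx : maxOf l ≤ x <;> simp [hx]

theorem cuts_append_ge (l : List Int) (x : Int) (hl : l ≠ []) (hx : maxOf l ≤ x) :
    cuts (l ++ [x]) = cuts l ++ [l.length] := by
  rw [cuts_append_split l x hl, if_pos hx]
  congr 1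
  apply List.filter_congr
  intro k hk
  rcases List.mem_range'_1.mp hk with ⟨hk1, _⟩
  rw [show (decide (maxOf (l.take k) ≤ x) : Bool) = true from
      decide_eq_true (le_trans (maxOf_take_le l k hl hk1) hx)]
  exact Bool.and_true _

theorem cuts_append_lt (l : List Int) (x : Int) (hl : l ≠ []) (hx : x < maxOf l) :
    cuts (l ++ [x]) = (cuts l).filter (fun k => decide (maxOf (l.take k) ≤ x)) := by
  rw [cuts_append_split l x hl, if_neg (by omega), List.append_nil]
  unfold cuts
  rw [List.filter_filter]
  apply List.filter_congr
  intro k _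
  exact Bool.and_comm _ _

theorem cuts_pairwise (p : List Int) : (cuts p).Pairwise (· < ·) :=
  List.Pairwise.filter _ (List.pairwise_lt_range' 1)

theorem cuts_mem_ge_one (p : List Int) (k : Nat) (hk : k ∈ cuts p) : 1 ≤ k := by
  have := List.mem_range'_1.mp (List.mem_of_mem_filter hk)
  omega

theorem cuts_mem_le (p : List Int) (k : Nat) (hk : k ∈ cuts p) : k ≤ p.length := by
  have := List.mem_range'_1.mp (List.mem_of_mem_filter hk)
  omega

theorem stack_sortedR (l : List Int) (hl : l ≠ []) :
    (((cuts l).map (fun k => maxOf (l.take k))).reverse).Pairwise (fun a b => b ≤ a) := by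
  rw [List.pairwise_reverse]
  refine List.Pairwise.map _ (fun a b h => h) ?_
  refine List.Pairwise.imp_of_mem ?_ (cuts_pairwise l)
  intro a b ha hb hab
  exact maxOf_take_mono l a b hl (cuts_mem_ge_one l a ha) (le_of_lt hab)

-- the stack after a whole (nonempty) prefix: the overall max on top, below it the
-- maxima maxOf (l.take k) of the valid cuts k, newest first
theorem stack_spec (l : List Int) (hl : l ≠ []) :
    l.foldl pvStackStep [] =
      maxOf l :: ((cuts l).map (fun k => maxOf (l.take k))).reverse := by
  induction l using List.reverseRecOn with
  | nil => simp at hl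
  | append_singleton l x ih =>
      by_cases hl0 : l = []
      · subst hl0
        simp [cuts, maxOf, pvStackStep]
      · rw [List.foldl_append, ih hl0, List.foldl_cons, List.foldl_nil]
        have hmap : ∀ (c : List Nat), (∀ k ∈ c, k ≤ l.length) →
            c.map (fun k => maxOf ((l ++ [x]).take k)) = c.map (fun k => maxOf (l.take k)) :=
          fun c hc => List.map_congr_left
            (fun k hk => by rw [List.take_append_of_le_length (hc k hk)])
        by_cases hx : x ≥ maxOf l
        · rw [pvStackStep, if_pos hx]
          rw [maxOf_append_singleton l x hl0, max_eq_right hx,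
              cuts_append_ge l x hl0 hx, List.map_append, List.reverse_append,
              hmap (cuts l) (cuts_mem_le l)]
          rw [show ([l.length].map (fun k => maxOf ((l ++ [x]).take k))) = [maxOf l] by
            simp only [List.map_cons, List.map_nil]
            rw [List.take_append_of_le_length le_rfl, List.take_length]]
          rfl
        · have hlt : x < maxOf l := lt_of_not_ge hx
          rw [pvStackStep, if_neg hx]
          rw [maxOf_append_singleton l x hl0, max_eq_left (le_of_lt hlt),
              cuts_append_lt l x hl0 hlt,
              hmap _ (fun k hk => cuts_mem_le l k (List.mem_of_mem_filter hk))]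
          rw [show (fun k => decide (maxOf (List.take k l) ≤ x))
                = ((fun y => decide (y ≤ x)) ∘ (fun k => maxOf (List.take k l))) from rfl]
          rw [← List.filter_map, ← List.filter_reverse,
              popGT_filter x _ (stack_sortedR l hl0)]

theorem B_eq (a : List Int) : max_partition_alt a = 1 + ((cuts a).length : Int) := by
  by_cases h : a = []
  · subst h; rfl
  · unfold max_partition_alt
    rw [stack_spec a h]
    simp [PySem.List.len]
    omega

theorem A_eq2 (a : List Int) : max_partition a = 1 + ((cuts a).length : Int) := by
  rw [A_eq]
  have h := foldl_if_shift (fun k => maxOf (a.take (k + 1)) ≤ minOf (a.drop (k + 1)))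
    (List.range (a.length - 1)) 0
  rw [show (0 : Int) + 1 = 1 by norm_num] at h
  rw [h]
  congr 1
  have h2 := PySem.List.foldl_count_if (fun k => validCut a (k + 1)) (List.range (a.length - 1)) 0
  simp only [validCut, decide_eq_true_eq] at h2
  rw [h2, zero_add]
  congr 1
  rw [cuts, ← List.countP_eq_length_filter, List.range'_eq_map_range, List.countP_map]
  congr 1
  funext k
  simp only [Function.comp, validCut, Nat.add_comm 1 k]

theorem max_partition_eq (a : List Int) : max_partition a = max_partition_alt a := by
  rw [A_eq2, B_eq]

-- ===== VERDICT (by name: the statement is the Claim_ definition above) =====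
theorem max_partition_spec : Claim_equal_max_partition := by
  intro a _
  unfold Spec_max_partition
  exact max_partition_eq a
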